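-- pv_equiv track=rewrite | github.com/Romelai28/Practica-3 | Prácticas/Soluciones/practica8.py | tiene_3_vocales_distintas
-- ===== SOURCE A (Python) =====
-- def pertenece(s: list, e) -> bool:
--     for i in s:
--         if i == e:
--             return True
--     return False
--
-- def tiene_3_vocales_distintas(palabra: str) -> bool:
--     vocales: list[str] = ['a', 'e', 'i', 'o', 'u']
--     vocales_distintas: int = 0
--     for vocal in vocales:
--         if pertenece(palabra, vocal):
--             vocales_distintas += 1
--             if vocales_distintas == 3:
--                 return True
--     return False
-- ===== SOURCE B (Python) =====
-- def tiene_3_vocales_distintas(palabra: str) -> bool: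
--     vistas = set()
--     for c in palabra:
--         if c in 'aeiou':
--             vistas.add(c)
--             if len(vistas) == 3:
--                 return True
--     return False
-- ===== Notes on version B (the rewrite author's own statement) =====
-- stated objective: idiomatic
-- what changed: Single forward pass (one scan, early exit) over the word maintaining a set of distinct vowels seen (early exit at size 3), instead of looping over the 5 vowels and rescanning the whole word for each.
import Mathlib
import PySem

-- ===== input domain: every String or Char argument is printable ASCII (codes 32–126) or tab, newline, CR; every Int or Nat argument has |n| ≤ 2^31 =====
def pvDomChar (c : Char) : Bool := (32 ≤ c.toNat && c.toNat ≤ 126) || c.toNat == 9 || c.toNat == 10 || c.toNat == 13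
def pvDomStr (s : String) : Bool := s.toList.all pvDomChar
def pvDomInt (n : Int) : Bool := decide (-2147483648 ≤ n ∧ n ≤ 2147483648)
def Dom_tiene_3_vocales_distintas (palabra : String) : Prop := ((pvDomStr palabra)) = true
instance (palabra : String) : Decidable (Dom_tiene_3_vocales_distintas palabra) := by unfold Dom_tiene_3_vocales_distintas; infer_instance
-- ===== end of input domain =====

-- B is the idiomatic single pass over the word with a set of distinct vowels seen,
-- instead of A's loop over the 5 vowels rescanning the word for each.

-- ===== PORT A =====
def pertenece (s : List Char) (e : Char) : Bool :=
  match s with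
  | [] => false
  | i :: rest => if i == e then true else pertenece rest e

def tiene3Loop (palabra : List Char) : List Char → Int → Bool
  | [], _ => false
  | v :: rest, cnt =>
    if pertenece palabra v then
      (if cnt + 1 == 3 then true else tiene3Loop palabra rest (cnt + 1))
    else tiene3Loop palabra rest cnt

def tiene_3_vocales_distintas (palabra : String) : Bool :=
  tiene3Loop palabra.toList ['a', 'e', 'i', 'o', 'u'] 0

-- ===== PORT B =====
def altLoop : List Char → PySem.Set Char → Bool
  | [], _ => false
  | c :: rest, vistas =>
    if "aeiou".toList.contains c then
      let vistas' := PySem.Set.add vistas c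
      if vistas'.length == 3 then true else altLoop rest vistas'
    else altLoop rest vistas

def tiene_3_vocales_distintas_alt (palabra : String) : Bool :=
  altLoop palabra.toList PySem.Set.empty

-- ===== PRECONDITION & SPEC =====
def Spec_tiene_3_vocales_distintas (palabra : String) (out : Bool) : Prop := out = tiene_3_vocales_distintas_alt palabra
instance (palabra : String) (out : Bool) : Decidable (Spec_tiene_3_vocales_distintas palabra out) := by unfold Spec_tiene_3_vocales_distintas; infer_instance

-- ===== CLAIM (what is proved, stated in full; the proofs are below) =====
def Claim_equal_tiene_3_vocales_distintas : Prop := ∀ (palabra : String), Dom_tiene_3_vocales_distintas palabra → Spec_tiene_3_vocales_distintas palabra (tiene_3_vocales_distintas palabra)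

-- ===== LEMMAS AND PROOFS =====

def pvVowels : List Char := ['a', 'e', 'i', 'o', 'u']

theorem pertenece_eq (s : List Char) (e : Char) : pertenece s e = decide (e ∈ s) := by
  induction s with
  | nil => simp [pertenece]
  | cons i rest ih =>
    simp only [pertenece, ih, List.mem_cons]
    by_cases h : i = e
    · simp [h]
    · have hbe : (i == e) = false := by simp [h]
      simp only [hbe, Bool.false_eq_true, if_false, decide_eq_decide]
      have hne : ¬ e = i := fun hh => h hh.symm
      tauto

-- A's loop counts, with early exit at 3, how many of the remaining vowels occur in the word.
theorem tiene3Loop_eq (w : List Char) (l : List Char) (n : ℕ) (hn : n < 3) :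
    tiene3Loop w l (n : Int) = decide (3 ≤ n + l.countP (fun v => decide (v ∈ w))) := by
  induction l generalizing n with
  | nil => simp [tiene3Loop]; omega
  | cons v rest ih =>
    simp only [tiene3Loop, pertenece_eq, List.countP_cons]
    by_cases hv : v ∈ w
    · simp only [hv, decide_true, if_true]
      by_cases h2 : n = 2
      · subst h2; norm_num; omega
      · have hne : ¬ ((n : Int) + 1 == 3) = true := by simp [beq_iff_eq]; omega
        simp only [hne]
        have hcast : ((n : Int) + 1) = ((n + 1 : ℕ) : Int) := by push_cast; ring
        rw [hcast, ih (n + 1) (by omega)]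
        simp; omega
    · simp only [hv, decide_false, Bool.false_eq_true, if_false]
      rw [ih n hn]; simp

theorem length_filter_mem {s l : List Char} (hs : s.Nodup) (hl : l.Nodup)
    (hsub : ∀ x ∈ s, x ∈ l) :
    (l.filter (fun v => decide (v ∈ s))).length = s.length := by
  have hperm : List.Perm (l.filter (fun v => decide (v ∈ s))) s := by
    apply List.perm_of_nodup_nodup_toFinset_eq (hl.filter _) hs
    ext x
    simp only [List.mem_toFinset, List.mem_filter, decide_eq_true_eq]
    exact ⟨fun h => h.2, fun h => ⟨hsub x h, h⟩⟩
  exact hperm.length_eq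

-- B's loop returns true iff the distinct vowels already seen together with those in the
-- remaining characters number at least 3.
theorem altLoop_eq (l : List Char) (s : PySem.Set Char) (hs : List.Nodup s)
    (hsub : ∀ x ∈ s, x ∈ pvVowels) (hlen : s.length < 3) :
    altLoop l s = decide (3 ≤ (pvVowels.filter (fun v => decide (v ∈ s ∨ v ∈ l))).length) := by
  have hvn : pvVowels.Nodup := by decide
  induction l generalizing s with
  | nil =>
    have heq : (fun v => decide (v ∈ s ∨ v ∈ ([] : List Char))) = (fun v => decide (v ∈ s)) := by
      funext v; simp
    rw [heq, length_filter_mem hs hvn hsub]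
    simp [altLoop]; omega
  | cons c rest ih =>
    simp only [altLoop]
    by_cases hc : c ∈ pvVowels
    · have hcb : ("aeiou".toList.contains c) = true := by
        revert hc; unfold pvVowels; simp; try tauto
      rw [hcb]; simp only [if_true]
      set s' := PySem.Set.add s c with hs'
      have hmem : ∀ v, v ∈ s' ↔ v ∈ s ∨ v = c := fun v => PySem.Set.mem_add s c v
      have hnd : s'.Nodup := PySem.Set.nodup_add s c hs
      have hsub' : ∀ x ∈ s', x ∈ pvVowels := by
        intro x hx
        rcases (hmem x).mp hx with h | h
        · exact hsub x h
        · exact h ▸ hc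
      have hlen' : s'.length ≤ s.length + 1 := by
        rw [hs', PySem.Set.add_eq_ite]
        split <;> simp
      have hfc : (fun v => decide (v ∈ s ∨ v ∈ c :: rest)) = (fun v => decide (v ∈ s' ∨ v ∈ rest)) := by
        funext v
        simp only [List.mem_cons, hmem, decide_eq_decide]
        tauto
      rw [hfc]
      by_cases h3 : s'.length = 3
      · have heq3 : (pvVowels.filter (fun v => decide (v ∈ s'))).length = 3 := by
          rw [length_filter_mem hnd hvn hsub', h3]
        have hmono : (pvVowels.filter (fun v => decide (v ∈ s'))).length
            ≤ (pvVowels.filter (fun v => decide (v ∈ s' ∨ v ∈ rest))).length := by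
          simp only [← List.countP_eq_length_filter]
          apply List.countP_mono_left
          intro x _ hx
          simp only [decide_eq_true_eq] at hx ⊢
          exact Or.inl hx
        have : (s'.length == 3) = true := by simp [h3]
        rw [this]
        simp only [if_true]
        symm
        simp only [decide_eq_true_eq]
        omega
      · have : (s'.length == 3) = false := by simp [h3]
        rw [this]
        simp only [Bool.false_eq_true, if_false]
        exact ih s' hnd hsub' (by omega)
    · have hcb : ("aeiou".toList.contains c) = false := by
        revert hc; unfold pvVowels; simp; try tauto
      rw [hcb]
      simp only [Bool.false_eq_true, if_false]
      have hfc : pvVowels.filter (fun v => decide (v ∈ s ∨ v ∈ c :: rest))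
          = pvVowels.filter (fun v => decide (v ∈ s ∨ v ∈ rest)) := by
        apply List.filter_congr
        intro v hv
        have hvc : v ≠ c := fun h => hc (h ▸ hv)
        simp only [List.mem_cons, decide_eq_decide]
        tauto
      rw [hfc]
      exact ih s hs hsub hlen

-- ===== VERDICT (by name: the statement is the Claim_ definition above) =====
theorem tiene_3_vocales_distintas_spec : Claim_equal_tiene_3_vocales_distintas := by
  intro palabra _
  unfold Spec_tiene_3_vocales_distintas tiene_3_vocales_distintas tiene_3_vocales_distintas_alt
  rw [show (0 : Int) = ((0 : ℕ) : Int) from rfl, tiene3Loop_eq _ _ 0 (by omega),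
      altLoop_eq _ PySem.Set.empty (by simp [PySem.Set.empty]) (by simp [PySem.Set.empty]) (by simp [PySem.Set.empty])]
  have : (fun v => decide (v ∈ (PySem.Set.empty : PySem.Set Char) ∨ v ∈ palabra.toList))
       = (fun v => decide (v ∈ palabra.toList)) := by
    funext v; simp [PySem.Set.empty]
  rw [this]
  simp only [pvVowels, decide_eq_decide, List.countP_eq_length_filter]
  omega
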